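-- pv_equiv track=rewrite | github.com/pompyavi/pythonProject | PythonPractice/inclusive_range.py | inclusive_range
-- ===== SOURCE A (Python) =====
-- def inclusive_range(*args):
--
--     args_length = len(args)
--     start = 0
--     stop = 0
--     step = 1
--
--     if args_length < 0:
--         raise TypeError("Expected at least 1 argument")
--     elif args_length == 1:
--         stop = args[0]
--     elif args_length == 2:
--         (start, stop) = (args[0], args[1])
--     elif args_length == 3:
--         (start, stop, step) = (args[0], args[1], args[2])
--     else:
--         raise TypeError("Function takes at the most 3 arguments")
--
--     while start <= stop:
--         yield start
--         start += step
-- ===== SOURCE B (Python) =====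
-- def inclusive_range(*args):
--     args_length = len(args)
--     if args_length == 1:
--         start, stop, step = 0, args[0], 1
--     elif args_length == 2:
--         start, stop, step = args[0], args[1], 1
--     elif args_length == 3:
--         start, stop, step = args
--     else:
--         raise TypeError("Function takes at the most 3 arguments")
--     if start > stop:
--         return
--     count = (stop - start) // step + 1
--     for i in range(count):
--         yield start + i * step
-- ===== Notes on version B (the rewrite author's own statement) =====
-- stated objective: alternative
-- what changed: B replaces A's accumulate-and-compare while loop with a closed-form element count (stop-start)//step + 1 followed by direct indexing start + i*step over range(count).
import Mathlib
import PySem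

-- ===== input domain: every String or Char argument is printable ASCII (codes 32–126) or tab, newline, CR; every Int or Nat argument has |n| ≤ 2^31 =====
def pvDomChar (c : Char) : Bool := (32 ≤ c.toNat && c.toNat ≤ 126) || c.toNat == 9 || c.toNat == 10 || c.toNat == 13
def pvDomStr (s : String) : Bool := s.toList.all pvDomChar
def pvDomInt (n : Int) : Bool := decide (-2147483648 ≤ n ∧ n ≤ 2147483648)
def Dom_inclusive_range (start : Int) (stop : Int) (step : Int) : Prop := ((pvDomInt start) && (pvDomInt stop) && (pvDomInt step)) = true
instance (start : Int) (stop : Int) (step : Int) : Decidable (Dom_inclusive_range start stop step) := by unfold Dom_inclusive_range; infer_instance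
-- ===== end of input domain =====

-- B replaces A's accumulate-and-compare while loop with a closed-form element count and
-- direct indexing; return values agree on every input where A's generator terminates.

-- ===== PORT A =====
-- the 'while start <= stop: yield start; start += step' loop; fuel bounds the
-- iteration count (with step ≥ 1 at most (stop-start)+1 iterations happen, so the
-- fuel never runs out on inputs admitted by Pre_)
def irLoopA (fuel : Nat) (start stop step : Int) (acc : List Int) : List Int :=
  match fuel with
  | 0 => acc.reverse
  | f + 1 =>
    if start ≤ stop then irLoopA f (start + step) stop step (start :: acc)
    else acc.reverse

def inclusive_range (start : Int) (stop : Int) (step : Int) : List Int :=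
  irLoopA ((stop - start).toNat + 1) start stop step []

-- ===== PORT B =====
def inclusive_range_alt (start : Int) (stop : Int) (step : Int) : List Int :=
  if start > stop then []
  else
    (List.range (PySem.Int.floordiv (stop - start) step + 1).toNat).map
      (fun (i : Nat) => start + (i : Int) * step)

-- ===== PRECONDITION & SPEC =====
-- Pre_ excludes exactly the inputs on which A's generator never terminates
-- (step ≤ 0 while start ≤ stop: the while loop runs forever); A returns no value there.
def Pre_inclusive_range (start : Int) (stop : Int) (step : Int) : Prop :=
  1 ≤ step ∨ stop < start
instance (start : Int) (stop : Int) (step : Int) : Decidable (Pre_inclusive_range start stop step) := by unfold Pre_inclusive_range; infer_instance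

def pvWitness_inclusive_range : Int × Int × Int := (1, 10, 3)

def Spec_inclusive_range (start : Int) (stop : Int) (step : Int) (out : List Int) : Prop := out = inclusive_range_alt start stop step
instance (start : Int) (stop : Int) (step : Int) (out : List Int) : Decidable (Spec_inclusive_range start stop step out) := by unfold Spec_inclusive_range; infer_instance

-- ===== CLAIM (what is proved, stated in full; the proofs are below) =====
def Claim_equal_inclusive_range : Prop := ∀ (start : Int) (stop : Int) (step : Int), Dom_inclusive_range start stop step → Pre_inclusive_range start stop step → Spec_inclusive_range start stop step (inclusive_range start stop step)

-- ===== LEMMAS AND PROOFS =====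

-- B's closed form satisfies the one-step unfolding of A's while loop (step ≥ 1).
lemma alt_unfold (start stop step : Int) (hs : 1 ≤ step) :
    inclusive_range_alt start stop step =
      if start ≤ stop then start :: inclusive_range_alt (start + step) stop step
      else [] := by
  by_cases h : start ≤ stop
  · rw [if_pos h]
    by_cases h2 : start + step ≤ stop
    · unfold inclusive_range_alt
      rw [if_neg (by omega), if_neg (by omega)]
      have e1 : PySem.Int.floordiv (stop - start) step = (stop - start) / step :=
        PySem.Int.floordiv_eq_ediv_of_pos (by omega)
      have e2 : PySem.Int.floordiv (stop - (start + step)) step = (stop - (start + step)) / step :=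
        PySem.Int.floordiv_eq_ediv_of_pos (by omega)
      have key : (stop - start) / step = (stop - (start + step)) / step + 1 := by
        have e3 : stop - start = (stop - (start + step)) + 1 * step := by ring
        rw [e3, Int.add_mul_ediv_right _ _ (by omega : step ≠ 0)]
      have hn : 0 ≤ (stop - (start + step)) / step :=
        Int.ediv_nonneg (by omega) (by omega)
      have hcnt : (PySem.Int.floordiv (stop - start) step + 1).toNat =
          ((PySem.Int.floordiv (stop - (start + step)) step + 1).toNat) + 1 := by
        rw [e1, e2, key]; omega
      rw [hcnt, List.range_succ_eq_map, List.map_cons, List.map_map]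
      refine congrArg₂ List.cons (by simp) ?_
      apply List.map_congr_left
      intro i _
      simp only [Function.comp]
      push_cast
      ring
    · -- exactly one element remains
      unfold inclusive_range_alt
      rw [if_neg (by omega), if_pos (by omega)]
      have e1 : PySem.Int.floordiv (stop - start) step = (stop - start) / step :=
        PySem.Int.floordiv_eq_ediv_of_pos (by omega)
      have h0 : (stop - start) / step = 0 :=
        Int.ediv_eq_zero_of_lt (by omega) (by omega)
      rw [e1, h0]
      simp
  · rw [if_neg h]
    unfold inclusive_range_alt
    rw [if_pos (by omega)]

-- A's fueled loop reaches B's closed form whenever the fuel exceeds stop - start (step ≥ 1).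
lemma loopA_eq (step stop : Int) (hs : 1 ≤ step) :
    ∀ (fuel : Nat) (start : Int) (acc : List Int), (stop - start).toNat < fuel →
      irLoopA fuel start stop step acc = acc.reverse ++ inclusive_range_alt start stop step := by
  intro fuel
  induction fuel with
  | zero => intro start acc h; omega
  | succ f ih =>
    intro start acc h
    rw [irLoopA, alt_unfold start stop step hs]
    by_cases hle : start ≤ stop
    · rw [if_pos hle, if_pos hle]
      by_cases h2 : start + step ≤ stop
      · have hfuel : (stop - (start + step)).toNat < f := by omega
        rw [ih (start + step) (start :: acc) hfuel]
        simp
      · have halt : inclusive_range_alt (start + step) stop step = [] := by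
          unfold inclusive_range_alt
          rw [if_pos (by omega)]
        rw [halt]
        cases f with
        | zero => simp [irLoopA]
        | succ g =>
          rw [irLoopA, if_neg (by omega)]
          simp
    · rw [if_neg hle, if_neg hle]
      simp

-- ===== VERDICT (by name: the statement is the Claim_ definition above) =====
theorem inclusive_range_spec : Claim_equal_inclusive_range := by
  intro start stop step _ hpre
  unfold Spec_inclusive_range inclusive_range
  rcases hpre with hs | hlt
  · rw [loopA_eq step stop hs _ start [] (by omega)]
    simp
  · rw [irLoopA, if_neg (by omega)]
    simp [inclusive_range_alt, hlt]
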